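-- pv_equiv track=rewrite | github.com/ChiuKiki/pj1 | ruling.py | ruling
-- ===== SOURCE A (Python) =====
-- def ruling(a):
--     for i in range(len(a)):
--         a[i].sort()
--     q = 0
--     Max = 0
--     Len = len(a)
--     for i in range(len(a)):
--         count = 0
--         for j in range(Len-i-1):
--             if a[Len - i - 1] == a[Len - i - 1 - j - 1]:
--                 count += 1
--         if count > Max:
--             Max = count
--             q = Len - i - 1
--     if Max >= 1:
--         return q
--     else:
--         return 0
-- ===== SOURCE B (Python) =====
-- def ruling(a):
--     # One pass with a counter keyed by the sorted row (A sorts rows in place; B does not mutate a).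
--     counts = {}
--     best = 0
--     q = 0
--     for i, row in enumerate(a):
--         key = tuple(sorted(row))
--         c = counts.get(key, 0)
--         counts[key] = c + 1
--         if c >= 1 and c >= best:
--             best = c
--             q = i
--     return q
-- ===== Notes on version B (the rewrite author's own statement) =====
-- stated objective: faster
-- what changed: A compares each row against every earlier row (and pre-sorts rows in place); B makes one forward pass keeping a dict counting occurrences of each sorted row, so the per-row inner scan disappears, tracking the last index whose earlier-duplicate count is maximal.
import Mathlib
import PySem

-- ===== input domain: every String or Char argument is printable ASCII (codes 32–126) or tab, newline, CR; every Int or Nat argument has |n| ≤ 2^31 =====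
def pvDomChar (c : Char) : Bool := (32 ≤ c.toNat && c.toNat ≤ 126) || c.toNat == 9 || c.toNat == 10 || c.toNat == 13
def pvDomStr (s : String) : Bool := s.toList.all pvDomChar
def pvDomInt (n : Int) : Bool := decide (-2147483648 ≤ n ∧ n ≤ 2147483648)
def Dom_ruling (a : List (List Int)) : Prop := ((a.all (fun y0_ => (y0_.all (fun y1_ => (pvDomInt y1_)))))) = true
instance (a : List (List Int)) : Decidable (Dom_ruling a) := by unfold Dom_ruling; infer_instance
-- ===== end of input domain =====

-- B replaces A's quadratic scan over all earlier rows by a single pass with a counter dict keyed by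
-- the sorted row (same return value; A sorts the rows of `a` in place, B does not mutate its
-- argument — the equivalence proved here is about the return value only).

-- ===== PORT A =====
def ruling (a : List (List Int)) : Int :=
  -- for i in range(len(a)): a[i].sort()   (elementwise in-place sort of each row)
  let a := a.map (fun r => PySem.List.sorted r (fun x => x) false)
  let q : Int := 0
  let mx : Int := 0
  let len : Int := a.length
  let s := (PySem.List.pyRange 0 (a.length : Int)).foldl
    (fun (s : Int × Int) i =>
      let count := (PySem.List.pyRange 0 (len - i - 1)).foldl
        (fun c j =>
          if PySem.List.pyGetD a (len - i - 1) [] = PySem.List.pyGetD a (len - i - 1 - j - 1) []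
          then c + 1 else c) (0 : Int)
      if count > s.2 then (len - i - 1, count) else s)
    (q, mx)
  if s.2 ≥ 1 then s.1 else 0

-- ===== PORT B =====
def ruling_alt (a : List (List Int)) : Int :=
  let s := (PySem.List.enumerate a).foldl
    (fun (s : PySem.Dict (List Int) Int × Int × Int) p =>
      let key := PySem.List.sorted p.2 (fun x => x) false
      let c := s.1.getD key 0
      let counts := s.1.insert key (c + 1)
      if 1 ≤ c ∧ s.2.1 ≤ c then (counts, c, p.1) else (counts, s.2.1, s.2.2))
    (PySem.Dict.empty, 0, 0)
  s.2.2

-- ===== PRECONDITION & SPEC =====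
def Spec_ruling (a : List (List Int)) (out : Int) : Prop := out = ruling_alt a
instance (a : List (List Int)) (out : Int) : Decidable (Spec_ruling a out) := by unfold Spec_ruling; infer_instance

-- ===== CLAIM (what is proved, stated in full; the proofs are below) =====
def Claim_equal_ruling : Prop := ∀ (a : List (List Int)), Dom_ruling a → Spec_ruling a (ruling a)

-- ===== LEMMAS AND PROOFS =====

-- the sort applied to every row
def sfR (r : List Int) : List Int := PySem.List.sorted r (fun x => x) false

-- csGen p ys lists, for each element of ys, how many equal rows precede it (p = rows already seen)
def csGen : List (List Int) → List (List Int) → List Int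
  | _, [] => []
  | p, y :: t => ((p.count y : Nat) : Int) :: csGen (p ++ [y]) t

-- A's descending selection step (state (q, Max)) and B's ascending one (state (best, q))
def dstep (s : Int × Int) (kc : Int × Int) : Int × Int := if s.2 < kc.2 then (kc.1, kc.2) else s
def astep (s : Int × Int) (ic : Int × Int) : Int × Int := if 1 ≤ ic.2 ∧ s.1 ≤ ic.2 then (ic.2, ic.1) else s

theorem csGen_length (p ys : List (List Int)) : (csGen p ys).length = ys.length := by
  induction ys generalizing p with
  | nil => rfl
  | cons y t ih => simp [csGen, ih]

theorem csGen_getD (ys : List (List Int)) : ∀ (p : List (List Int)) (k : Nat), k < ys.length →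
    (csGen p ys).getD k 0 = ((p ++ ys.take k).count (ys.getD k []) : Nat) := by
  induction ys with
  | nil => intro p k h; simp at h
  | cons y t ih =>
    intro p k h
    cases k with
    | zero => simp [csGen]
    | succ k =>
      simp only [csGen, List.getD_cons_succ, List.take_succ_cons]
      rw [ih (p ++ [y]) k (by simpa using h)]
      simp [List.append_assoc]

theorem map_range_getD (xs : List (List Int)) (k : Nat) (hk : k ≤ xs.length) :
    (List.range k).map (fun j => xs.getD j []) = xs.take k := by
  apply List.ext_getElem
  · simp [hk]
  · intro i h1 h2
    simp [List.getD_eq_getElem?_getD, List.getElem?_eq_getElem (by simp at h1 ⊢; omega : i < xs.length)]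

theorem map_range_rev (k : Nat) : (List.range k).map (fun j => k - 1 - j) = (List.range k).reverse := by
  apply List.ext_getElem
  · simp
  · intro i h1 h2
    simp at h1
    simp [List.getElem_reverse, List.getElem_range]

-- the inner count loop of A is the number of equal rows among the first k rows
theorem inner_count (xs : List (List Int)) (k : Nat) (hk : k < xs.length) :
    (PySem.List.pyRange 0 (k : Int)).foldl
      (fun c j =>
        if PySem.List.pyGetD xs (k : Int) [] = PySem.List.pyGetD xs ((k : Int) - j - 1) []
        then c + 1 else c) (0 : Int)
    = ((xs.take k).count (xs.getD k []) : Nat) := by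
  rw [PySem.List.pyRange_zero_natCast, List.foldl_map]
  have step1 : ∀ (c : Int), ∀ j ∈ List.range k,
      (if PySem.List.pyGetD xs (k : Int) [] = PySem.List.pyGetD xs ((k : Int) - (j : Int) - 1) [] then c + 1 else c)
      = (if xs.getD k [] = xs.getD (k - 1 - j) [] then c + 1 else c) := by
    intro c j hj
    simp only [List.mem_range] at hj
    have e1 : PySem.List.pyGetD xs (k : Int) [] = xs.getD k [] := by
      simp [PySem.List.pyGetD_natCast]
    have e2 : PySem.List.pyGetD xs ((k : Int) - (j : Int) - 1) [] = xs.getD (k - 1 - j) [] := by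
      have : (k : Int) - (j : Int) - 1 = ((k - 1 - j : Nat) : Int) := by omega
      rw [this, PySem.List.pyGetD_natCast]
    rw [e1, e2]
  rw [PySem.List.foldl_congr_mem _ _ _ _ step1]
  have : (List.range k).foldl (fun c j => if xs.getD k [] = xs.getD (k - 1 - j) [] then c + 1 else c) (0 : Int)
      = ((List.range k).map (fun j => xs.getD (k - 1 - j) [])).foldl
          (fun c x => if (fun x => xs.getD k [] = x) x then c + 1 else c) (0 : Int) := by
    rw [List.foldl_map]
  rw [this]
  have hmap : (List.range k).map (fun j => xs.getD (k - 1 - j) []) = (xs.take k).reverse := by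
    have : (List.range k).map (fun j => xs.getD (k - 1 - j) [])
        = ((List.range k).map (fun j => k - 1 - j)).map (fun j => xs.getD j []) := by
      rw [List.map_map]; rfl
    rw [this, map_range_rev, List.map_reverse, map_range_getD xs k (le_of_lt hk)]
  rw [hmap]
  have hcf := PySem.List.foldl_count_if (fun x => decide (xs.getD k [] = x)) ((xs.take k).reverse) 0
  simp only [decide_eq_true_eq, zero_add] at hcf
  have hcc : List.count (xs.getD k []) (List.take k xs)
      = List.countP (fun x => decide (xs.getD k [] = x)) (List.take k xs) := by
    rw [List.count]
    apply List.countP_congr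
    intro x _
    by_cases h : x = xs.getD k []
    · simp [h]
    · simp only [decide_eq_true_eq, beq_iff_eq]
      simp only [List.getD_eq_getElem?_getD] at h
      simp [h, Ne.symm h]
  rw [hcf, List.countP_reverse, hcc]

-- A's whole computation as a descending pure fold over the counts list
theorem ruling_eq_dfold (a : List (List Int)) :
    ruling a =
      (let ys := a.map sfR
       let s := ((PySem.List.enumerate (csGen [] ys)).reverse).foldl dstep (0, 0)
       if s.2 ≥ 1 then s.1 else 0) := by
  rw [ruling]
  have hsf : (fun r => PySem.List.sorted r (fun x => x) false) = sfR := rfl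
  rw [hsf]
  set xs := a.map sfR with hxs
  set n := xs.length with hn
  set cs := csGen [] xs with hcs
  set cnt : Nat → Int := fun k => ((xs.take k).count (xs.getD k []) : Nat) with hcnt
  have main : (PySem.List.pyRange 0 (n : Int)).foldl
      (fun (s : Int × Int) i =>
        let count := (PySem.List.pyRange 0 ((n : Int) - i - 1)).foldl
          (fun c j =>
            if PySem.List.pyGetD xs ((n : Int) - i - 1) [] = PySem.List.pyGetD xs ((n : Int) - i - 1 - j - 1) []
            then c + 1 else c) (0 : Int)
        if count > s.2 then ((n : Int) - i - 1, count) else s)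
      ((0 : Int), (0 : Int))
      = ((PySem.List.enumerate cs).reverse).foldl dstep (0, 0) := by
    rw [PySem.List.pyRange_zero_natCast, List.foldl_map]
    have hbody : ∀ (s : Int × Int), ∀ i ∈ List.range n,
        (let count := (PySem.List.pyRange 0 ((n : Int) - (i : Int) - 1)).foldl
          (fun c j =>
            if PySem.List.pyGetD xs ((n : Int) - (i : Int) - 1) [] = PySem.List.pyGetD xs ((n : Int) - (i : Int) - 1 - j - 1) []
            then c + 1 else c) (0 : Int)
         if count > s.2 then ((n : Int) - (i : Int) - 1, count) else s)
        = dstep s ((((n - 1 - i : Nat) : Int)), cnt (n - 1 - i)) := by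
      intro s i hi
      simp only [List.mem_range] at hi
      have hk : n - 1 - i < n := by omega
      have e1 : (n : Int) - (i : Int) - 1 = ((n - 1 - i : Nat) : Int) := by omega
      simp only [e1]
      rw [inner_count xs (n - 1 - i) hk]
      simp only [dstep, gt_iff_lt, hcnt]
    rw [PySem.List.foldl_congr_mem _ _ _ _ hbody]
    have : (List.range n).foldl (fun s i => dstep s ((((n - 1 - i : Nat) : Int)), cnt (n - 1 - i))) (0, 0)
        = ((List.range n).map (fun i => ((((n - 1 - i : Nat) : Int)), cnt (n - 1 - i)))).foldl dstep (0, 0) := by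
      rw [List.foldl_map]
    rw [this]
    congr 1
    have h4 : (List.range n).map (fun i => ((((n - 1 - i : Nat) : Int)), cnt (n - 1 - i)))
        = ((List.range n).map (fun k => (n - 1 - k))).map (fun k => (((k : Nat) : Int), cnt k)) := by
      rw [List.map_map]; rfl
    rw [h4, map_range_rev, List.map_reverse]
    congr 1
    rw [PySem.List.enumerate_eq_map_pyRange cs 0]
    have hlen : PySem.List.len cs = (n : Int) := by
      simp [PySem.List.len_eq, csGen_length, hcs, hn]
    rw [hlen, PySem.List.pyRange_zero_natCast, List.map_map]
    apply List.map_congr_left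
    intro k hk
    simp only [List.mem_range] at hk
    simp only [Function.comp]
    rw [PySem.List.pyGetD_natCast]
    rw [hcs, csGen_getD xs [] k hk]
    simp [hcnt]
  simp only [main]
  rfl

-- the dict built over the already-seen rows, keyed by the sorted row
def mkdict (p : List (List Int)) : PySem.Dict (List Int) Int :=
  (p.map sfR).foldl (fun d y => d.insert y (d.getD y 0 + 1)) PySem.Dict.empty

-- B's loop invariant: the dict holds the multiplicities of the seen keys, and the (best, q) part
-- follows the ascending pure fold over the counts of earlier equal rows
theorem B_inv (xs : List (List Int)) : ∀ (p : List (List Int)) (b q : Int),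
    ((PySem.List.enumerate xs (p.length : Int)).foldl
      (fun (s : PySem.Dict (List Int) Int × Int × Int) pr =>
        let key := PySem.List.sorted pr.2 (fun x => x) false
        let c := s.1.getD key 0
        let counts := s.1.insert key (c + 1)
        if 1 ≤ c ∧ s.2.1 ≤ c then (counts, c, pr.1) else (counts, s.2.1, s.2.2))
      (mkdict p, b, q)).2
    = (PySem.List.enumerate (csGen (p.map sfR) (xs.map sfR)) (p.length : Int)).foldl astep (b, q) := by
  induction xs with
  | nil => intro p b q; simp [csGen]
  | cons x t ih =>
    intro p b q
    simp only [List.map_cons, csGen, PySem.List.enumerate_cons, List.foldl_cons]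
    have hc : (mkdict p).getD (PySem.List.sorted x (fun x => x) false) 0
        = (((p.map sfR).count (sfR x) : Nat) : Int) := by
      rw [mkdict, PySem.Dict.getD_foldl_insert_add_one]
      simp [sfR]
    have hd : (mkdict p).insert (PySem.List.sorted x (fun x => x) false)
          ((mkdict p).getD (PySem.List.sorted x (fun x => x) false) 0 + 1) = mkdict (p ++ [x]) := by
      rw [mkdict, mkdict]
      simp [List.foldl_append, sfR]
    have hlen : ((p ++ [x]).length : Int) = (p.length : Int) + 1 := by simp
    have hmap : (p ++ [x]).map sfR = p.map sfR ++ [sfR x] := by simp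
    have hd' : (mkdict p).insert (PySem.List.sorted x (fun x => x) false)
          ((((p.map sfR).count (sfR x) : Nat) : Int) + 1) = mkdict (p ++ [x]) := by
      rw [← hc]; exact hd
    by_cases hcond : 1 ≤ (((p.map sfR).count (sfR x) : Nat) : Int) ∧ b ≤ (((p.map sfR).count (sfR x) : Nat) : Int)
    · simp only [hc, astep]
      rw [hd', if_pos hcond, if_pos hcond]
      have := ih (p ++ [x]) ((((p.map sfR).count (sfR x) : Nat) : Int)) ((p.length : Int))
      rw [hlen, hmap] at this
      simpa [sfR] using this
    · simp only [hc, astep]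
      rw [hd', if_neg hcond, if_neg hcond]
      have := ih (p ++ [x]) b q
      rw [hlen, hmap] at this
      simpa [sfR] using this

-- B's whole computation as an ascending pure fold over the same counts list
theorem ruling_alt_eq_afold (a : List (List Int)) :
    ruling_alt a =
      ((PySem.List.enumerate (csGen [] (a.map sfR))).foldl astep (0, 0)).2 := by
  have h := B_inv a [] 0 0
  simp only [List.length_nil, Nat.cast_zero, List.map_nil] at h
  rw [ruling_alt]
  exact congrArg Prod.snd h

-- the best value only grows along the ascending fold
theorem afold_mono (l : List (Int × Int)) : ∀ st : Int × Int, st.1 ≤ (l.foldl astep st).1 := by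
  induction l with
  | nil => intro st; simp
  | cons hd t ih =>
    intro st
    simp only [List.foldl_cons]
    rcases st with ⟨b, q⟩
    by_cases h : 1 ≤ hd.2 ∧ b ≤ hd.2
    · calc b ≤ hd.2 := h.2
        _ ≤ (t.foldl astep (astep (b, q) hd)).1 := by
            simpa [astep, h] using ih (astep (b, q) hd)
    · simpa [astep, h] using ih (b, q)

-- running the ascending fold from a positive record (c, i) versus from (0, 0)
theorem afold_shift (l : List (Int × Int)) : ∀ (i c : Int), 1 ≤ c →
    l.foldl astep (c, i) =
      (if (l.foldl astep (0, 0)).1 < c then (c, i) else l.foldl astep (0, 0)) := by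
  induction l with
  | nil => intro i c hc; simp; omega
  | cons hd t ih =>
    intro i c hc
    rcases hd with ⟨j, d⟩
    simp only [List.foldl_cons]
    by_cases hd1 : 1 ≤ d
    · by_cases hcd : c ≤ d
      · have e1 : astep (c, i) (j, d) = (d, j) := by simp [astep, hd1, hcd]
        have e0 : astep (0, 0) (j, d) = (d, j) := by simp [astep, hd1]; omega
        rw [e1, e0]
        have := afold_mono t (d, j)
        simp at this
        rw [if_neg (by omega)]
      · have e1 : astep (c, i) (j, d) = (c, i) := by simp [astep]; omega
        have e0 : astep (0, 0) (j, d) = (d, j) := by simp [astep, hd1]; omega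
        rw [e1, e0, ih i c hc, ih j d hd1]
        have hdc : d < c := by omega
        split_ifs with h1 h2 h3 <;> first | rfl | omega
    · have e1 : astep (c, i) (j, d) = (c, i) := by simp [astep]; omega
      have e0 : astep (0, 0) (j, d) = (0, 0) := by simp [astep]; omega
      rw [e1, e0, ih i c hc]

-- A's descending strict scan equals B's ascending weak scan (with swapped state components)
theorem dfold_eq_afold (l : List (Int × Int)) :
    l.reverse.foldl dstep (0, 0) = ((l.foldl astep (0, 0)).2, (l.foldl astep (0, 0)).1) := by
  induction l with
  | nil => rfl
  | cons hd t ih =>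
    rcases hd with ⟨i, c⟩
    simp only [List.reverse_cons, List.foldl_append, List.foldl_cons, List.foldl_nil, ih]
    by_cases hc : 1 ≤ c
    · have e0 : astep (0, 0) (i, c) = (c, i) := by simp [astep]; omega
      rw [e0, afold_shift t i c hc]
      by_cases h1 : (t.foldl astep (0,0)).1 < c
      · rw [if_pos h1]; simp [dstep, h1]
      · rw [if_neg h1]; simp [dstep, h1]
    · have e0 : astep (0, 0) (i, c) = (0, 0) := by simp [astep]; omega
      rw [e0]
      have := afold_mono t (0, 0)
      simp [dstep]
      intro h; omega

-- if no positive count was ever seen, the ascending fold is still (0, 0)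
theorem afold_zero (l : List (Int × Int)) : ∀ (b q : Int),
    l.foldl astep (b, q) = (b, q) ∨ 1 ≤ (l.foldl astep (b, q)).1 := by
  induction l with
  | nil => intro b q; left; rfl
  | cons hd t ih =>
    intro b q
    simp only [List.foldl_cons]
    by_cases h : 1 ≤ hd.2 ∧ b ≤ hd.2
    · right
      have := afold_mono t (astep (b, q) hd)
      have h2 : (astep (b, q) hd).1 = hd.2 := by simp [astep, h]
      omega
    · simpa [astep, h] using ih b q

-- ===== VERDICT (by name: the statement is the Claim_ definition above) =====
theorem ruling_spec : Claim_equal_ruling := by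
  intro a _
  unfold Spec_ruling
  rw [ruling_eq_dfold, ruling_alt_eq_afold]
  simp only []
  rw [dfold_eq_afold]
  rcases afold_zero (PySem.List.enumerate (csGen [] (a.map sfR))) 0 0 with h | h
  · simp [h]
  · simp [h, ge_iff_le]
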